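-- pv_equiv track=rewrite | github.com/a97100Uminho/ATP2022 | TPC6/TP6.py | titPorComp
-- ===== SOURCE A (Python) =====
-- def titPorComp(obras):
--     dict={}
--     for nome, _, _ , _, comp, *_ in obras:
--         if comp in dict.keys(): #procura nas keys
--             dict[comp].append(nome)
--         else:
--             dict[comp]=[nome]
--
--     return dict
-- ===== SOURCE B (Python) =====
-- def titPorComp(obras):
--     # group titles by composer: first-occurrence-ordered distinct composers,
--     # then one comprehension per composer collecting its titles in order
--     comps = list(dict.fromkeys(t[4] for t in obras))
--     return {c: [t[0] for t in obras if t[4] == c] for c in comps}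
-- ===== Notes on version B (the rewrite author's own statement) =====
-- stated objective: alternative
-- what changed: Replaces the incremental dict-building loop (membership test + append/insert per record) by a two-phase decomposition: collect the distinct composers in first-occurrence order, then build each entry with a filtering comprehension over the records.
import Mathlib
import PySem

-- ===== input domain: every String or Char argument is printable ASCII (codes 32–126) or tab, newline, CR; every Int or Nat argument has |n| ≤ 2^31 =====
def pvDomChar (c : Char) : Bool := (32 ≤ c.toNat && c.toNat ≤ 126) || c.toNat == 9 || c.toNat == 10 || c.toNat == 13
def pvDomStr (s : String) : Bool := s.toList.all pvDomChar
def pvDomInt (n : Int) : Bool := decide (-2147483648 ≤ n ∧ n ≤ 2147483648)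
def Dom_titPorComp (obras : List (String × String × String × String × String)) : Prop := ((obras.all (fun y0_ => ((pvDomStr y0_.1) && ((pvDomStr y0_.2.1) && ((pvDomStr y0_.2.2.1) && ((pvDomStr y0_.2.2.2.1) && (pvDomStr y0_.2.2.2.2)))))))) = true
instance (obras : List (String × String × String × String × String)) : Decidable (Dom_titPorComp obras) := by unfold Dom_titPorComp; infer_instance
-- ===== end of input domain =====

-- B replaces A's incremental dict-building loop by distinct-composers-then-filter; alternative decomposition, same results.

-- ===== PORT A =====
-- literal port of A: a dict built record by record (membership test, then append or fresh entry)
def titPorComp (obras : List (String × String × String × String × String)) : List (String × List String) :=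
  (obras.foldl
    (fun d t =>
      if d.contains t.2.2.2.2 then d.modify t.2.2.2.2 [] (fun v => v ++ [t.1])
      else d.insert t.2.2.2.2 [t.1])
    (PySem.Dict.empty : PySem.Dict String (List String))).items

-- ===== PORT B =====
-- literal port of B: distinct composers in first-occurrence order, then a filter per composer
def titPorComp_alt (obras : List (String × String × String × String × String)) : List (String × List String) :=
  (PySem.Set.ofList (obras.map (fun t => t.2.2.2.2))).map
    (fun c => (c, (obras.filter (fun t => t.2.2.2.2 == c)).map (fun t => t.1)))

-- ===== PRECONDITION & SPEC =====
def Spec_titPorComp (obras : List (String × String × String × String × String)) (out : List (String × List String)) : Prop := out = titPorComp_alt obras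
instance (obras : List (String × String × String × String × String)) (out : List (String × List String)) : Decidable (Spec_titPorComp obras out) := by unfold Spec_titPorComp; infer_instance

-- ===== CLAIM (what is proved, stated in full; the proofs are below) =====
def Claim_equal_titPorComp : Prop := ∀ (obras : List (String × String × String × String × String)), Dom_titPorComp obras → Spec_titPorComp obras (titPorComp obras)

-- ===== LEMMAS AND PROOFS =====

-- A's branching step is exactly Python's d[k] = d.get(k, []) + [v], i.e. one modify
theorem titPorComp_step_eq (d : PySem.Dict String (List String))
    (t : String × String × String × String × String) :
    (if d.contains t.2.2.2.2 then d.modify t.2.2.2.2 [] (fun v => v ++ [t.1])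
     else d.insert t.2.2.2.2 [t.1])
      = d.modify t.2.2.2.2 [] (fun v => v ++ [t.1]) := by
  split_ifs with h
  · rfl
  · have h' : d.contains t.2.2.2.2 = false := by simpa using h
    have hm : d.modify t.2.2.2.2 [] (fun v => v ++ [t.1])
        = d.insert t.2.2.2.2 (d.getD t.2.2.2.2 [] ++ [t.1]) := rfl
    rw [hm, PySem.Dict.getD_of_not_contains _ _ h', List.nil_append]

-- the whole loop as a modify-fold over (composer, title) pairs
theorem titPorComp_eq_pairs_fold (obras : List (String × String × String × String × String)) :
    titPorComp obras =
      ((obras.map (fun t => (t.2.2.2.2, t.1))).foldl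
        (fun d p => d.modify p.1 [] (fun v => v ++ [p.2]))
        (PySem.Dict.empty : PySem.Dict String (List String))).items := by
  unfold titPorComp
  rw [List.foldl_map]
  have hf : (fun (d : PySem.Dict String (List String)) (t : String × String × String × String × String) =>
      if d.contains t.2.2.2.2 then d.modify t.2.2.2.2 [] (fun v => v ++ [t.1])
      else d.insert t.2.2.2.2 [t.1])
      = fun d t => d.modify t.2.2.2.2 [] (fun v => v ++ [t.1]) := by
    funext d t; exact titPorComp_step_eq d t
  rw [hf]

-- ===== VERDICT (by name: the statement is the Claim_ definition above) =====
theorem titPorComp_spec : Claim_equal_titPorComp := by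
  intro obras _
  show titPorComp obras = titPorComp_alt obras
  rw [titPorComp_eq_pairs_fold]
  set pairs := obras.map (fun t => (t.2.2.2.2, t.1)) with hpairs
  set D := pairs.foldl (fun d p => d.modify p.1 [] (fun v => v ++ [p.2]))
      (PySem.Dict.empty : PySem.Dict String (List String)) with hD
  have hkeys : D.keys = PySem.Set.ofList (obras.map (fun t => t.2.2.2.2)) := by
    rw [hD, PySem.Dict.keys_foldl_modify_key]
    simp [hpairs, PySem.Set.update_nil_left, List.map_map, Function.comp_def]
  have hnd : D.keys.Nodup := by rw [hkeys]; exact PySem.Set.nodup_ofList _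
  rw [PySem.Dict.items_eq_map_keys D hnd [], hkeys]
  unfold titPorComp_alt
  apply List.map_congr_left
  intro c _
  congr 1
  rw [hD, PySem.Dict.getD_foldl_modify_append, hpairs]
  simp [List.filter_map, Function.comp_def, List.map_map]
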